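-- pv_equiv track=rewrite | github.com/jorzel/codefights | challange/wordCupStages.py | worldCupStages
-- ===== SOURCE A (Python) =====
-- def worldCupStages(results):
--     firsts, seconds = [], []
--     for group in results:
--         firsts.append((group[0], len(group[0])))
--         seconds.append((group[1], len(group[1])))
--     output = ["|", "|"]
--     for i in range(len(firsts)):
--         if i % 2 == 0:
--             j = i + 1
--         else:
--             j = i - 1
--         first, second = firsts[i], seconds[j]
--         width = max(first[1], second[1])
--         output[0] += first[0] + (width - first[1]) * ' ' + '|'
--         output[1] += second[0] + (width - second[1]) * ' ' + '|'
--     return output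
-- ===== SOURCE B (Python) =====
-- def _swap_pairs(xs):
--     out = []
--     while xs:
--         p, q, xs = xs[0], xs[1], xs[2:]
--         out += [q, p]
--     return out
--
--
-- def worldCupStages(results):
--     top = [g[0] for g in results]
--     bottom = _swap_pairs([g[1] for g in results])
--     widths = [max(len(t), len(s)) for t, s in zip(top, bottom)]
--     return ["|" + "".join(c.ljust(w) + "|" for c, w in zip(row, widths))
--             for row in (top, bottom)]
-- ===== Notes on version B (the rewrite author's own statement) =====
-- stated objective: alternative
-- what changed: B replaces A's single indexed loop (parity arithmetic j=i±1, two (name,len) tuple lists, two growing row strings) by staged passes: extract the winner and runner-up columns, partner-swap the runner-up column with a small helper, compute per-column widths by zipping, and render each row independently with str.ljust and ''.join.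
import Mathlib
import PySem

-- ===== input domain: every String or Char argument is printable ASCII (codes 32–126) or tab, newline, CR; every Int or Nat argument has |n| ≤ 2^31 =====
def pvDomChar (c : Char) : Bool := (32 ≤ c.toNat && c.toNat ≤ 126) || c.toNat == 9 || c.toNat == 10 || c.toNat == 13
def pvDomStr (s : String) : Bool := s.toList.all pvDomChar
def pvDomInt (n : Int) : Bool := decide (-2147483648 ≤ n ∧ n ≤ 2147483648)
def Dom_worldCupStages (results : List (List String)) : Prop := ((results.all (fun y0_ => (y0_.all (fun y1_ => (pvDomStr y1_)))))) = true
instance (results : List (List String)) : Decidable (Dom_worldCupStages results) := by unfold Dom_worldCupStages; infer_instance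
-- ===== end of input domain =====

-- B replaces A's single indexed loop (parity arithmetic, tuple lists, two growing strings)
-- by staged passes: columns, a partner-swap helper, zipped widths, and per-row joins
-- (objective: alternative decomposition; same cost).

-- ===== PORT A =====
-- s.ljust(w) / s + n*' ': both pad s with max(0, w - len s) spaces
def wcsPad (s : String) (w : Int) : String :=
  s ++ String.ofList (List.replicate (w - PySem.Str.len s).toNat ' ')

-- (group[0], len(group[0])) and (group[1], len(group[1]))
def wcsF (group : List String) : String × Int :=
  (PySem.List.pyGetD group 0 "", PySem.Str.len (PySem.List.pyGetD group 0 ""))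
def wcsS (group : List String) : String × Int :=
  (PySem.List.pyGetD group 1 "", PySem.Str.len (PySem.List.pyGetD group 1 ""))

-- one iteration of A's second loop ('n * ' '' ported by hand as replicate; exact, Python clamps negative n to '')
def wcsStep (firsts seconds : List (String × Int)) (out : String × String) (i : Int) : String × String :=
  let j := if PySem.Int.mod i 2 = 0 then i + 1 else i - 1
  let first := PySem.List.pyGetD firsts i ("", 0)
  let second := PySem.List.pyGetD seconds j ("", 0)
  let width := max first.2 second.2
  (out.1 ++ first.1 ++ String.ofList (List.replicate (width - first.2).toNat ' ') ++ "|",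
   out.2 ++ second.1 ++ String.ofList (List.replicate (width - second.2).toNat ' ') ++ "|")

def worldCupStages (results : List (List String)) : List String :=
  let fsss := results.foldl (fun acc group => (acc.1 ++ [wcsF group], acc.2 ++ [wcsS group])) ([], [])
  let output := (PySem.List.pyRange 0 (PySem.List.len fsss.1) 1).foldl (wcsStep fsss.1 fsss.2) ("|", "|")
  [output.1, output.2]

-- ===== PORT B =====
-- _swap_pairs: the while loop consuming xs two at a time; xs[1] on a singleton is where
-- Python raises IndexError (outside Pre_), ported with pyGetD's default; xs[2:] = rest.drop 1
def wcsSwapPairs (xs : List String) (out : List String) : List String :=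
  match xs with
  | [] => out
  | x :: rest => wcsSwapPairs (rest.drop 1) (out ++ [PySem.List.pyGetD rest 0 "", x])
termination_by xs.length
decreasing_by simp

-- "".join(c.ljust(w) + "|" for c, w in zip(row, widths))
def wcsRow (row : List String) (widths : List Int) : String :=
  PySem.Str.join "" ((row.zip widths).map (fun cw => wcsPad cw.1 cw.2 ++ "|"))

def worldCupStages_alt (results : List (List String)) : List String :=
  let top := results.map (fun g => PySem.List.pyGetD g 0 "")
  let bottom := wcsSwapPairs (results.map (fun g => PySem.List.pyGetD g 1 "")) []
  let widths := (top.zip bottom).map (fun ts => max (PySem.Str.len ts.1) (PySem.Str.len ts.2))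
  [top, bottom].map (fun row => "|" ++ wcsRow row widths)

-- ===== PRECONDITION & SPEC =====
-- Pre_ excludes exactly the inputs on which Python A raises IndexError: a group with fewer
-- than two entries (group[1]) or an odd number of groups (seconds[i+1] at the last even i).
def Pre_worldCupStages (results : List (List String)) : Prop :=
  results.length % 2 = 0 ∧ ∀ g ∈ results, 2 ≤ g.length
instance (results : List (List String)) : Decidable (Pre_worldCupStages results) := by
  unfold Pre_worldCupStages; infer_instance
def pvWitness_worldCupStages : List (List String) := [["Aa", "Bb"], ["C", "Dd"]]

def Spec_worldCupStages (results : List (List String)) (out : List String) : Prop :=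
  out = worldCupStages_alt results
instance (results : List (List String)) (out : List String) : Decidable (Spec_worldCupStages results out) := by
  unfold Spec_worldCupStages; infer_instance

-- ===== CLAIM (what is proved, stated in full; the proofs are below) =====
def Claim_equal_worldCupStages : Prop := ∀ (results : List (List String)), Dom_worldCupStages results → Pre_worldCupStages results → Spec_worldCupStages results (worldCupStages results)

-- ===== LEMMAS AND PROOFS =====

-- the two aligned cells contributed by one pair of groups, as A/B both produce them
def wcsCells : List (List String) → String × String
  | a :: b :: rest =>
      let a0 := PySem.List.pyGetD a 0 ""
      let a1 := PySem.List.pyGetD a 1 ""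
      let b0 := PySem.List.pyGetD b 0 ""
      let b1 := PySem.List.pyGetD b 1 ""
      let w0 := max (PySem.Str.len a0) (PySem.Str.len b1)
      let w1 := max (PySem.Str.len b0) (PySem.Str.len a1)
      (wcsPad a0 w0 ++ "|" ++ wcsPad b0 w1 ++ "|" ++ (wcsCells rest).1,
       wcsPad b1 w0 ++ "|" ++ wcsPad a1 w1 ++ "|" ++ (wcsCells rest).2)
  | _ => ("", "")

theorem wcs_join_cons (x : String) (xs : List String) :
    PySem.Str.join "" (x :: xs) = x ++ PySem.Str.join "" xs := by
  cases xs with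
  | nil => simp [PySem.Str.join, PySem.Chars.join, List.intercalate]
  | cons y ys =>
    simp only [PySem.Str.join, List.map_cons, PySem.Chars.join_cons_cons,
      String.ofList_append, String.ofList_toList]
    simp [String.append_empty]

theorem wcsRow_cons (x : String) (xs : List String) (w : Int) (ws : List Int) :
    wcsRow (x :: xs) (w :: ws) = wcsPad x w ++ "|" ++ wcsRow xs ws := by
  simp only [wcsRow, List.zip_cons_cons, List.map_cons, wcs_join_cons, String.append_assoc]

theorem wcsSwapPairs_acc : ∀ (xs out : List String),
    wcsSwapPairs xs out = out ++ wcsSwapPairs xs []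
  | [], out => by simp [wcsSwapPairs]
  | x :: rest, out => by
    rw [wcsSwapPairs, wcsSwapPairs, wcsSwapPairs_acc (rest.drop 1),
      wcsSwapPairs_acc (rest.drop 1) (([] : List String) ++ _)]
    simp
termination_by xs => xs.length
decreasing_by all_goals simp

-- A's first loop (one pass appending to two lists) builds the two maps
theorem wcs_fold_pair (results : List (List String)) (acc1 acc2 : List (String × Int)) :
    results.foldl (fun acc group => (acc.1 ++ [wcsF group], acc.2 ++ [wcsS group])) (acc1, acc2)
      = (acc1 ++ results.map wcsF, acc2 ++ results.map wcsS) := by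
  induction results generalizing acc1 acc2 with
  | nil => simp
  | cons g gs ih => simp [List.foldl, ih]

theorem wcs_getD_shift2 {α : Type} (x y : α) (xs : List α) (d : α) (k : Nat) :
    PySem.List.pyGetD (x :: y :: xs) ((k : Int) + 2) d = xs.getD k d := by
  have h : ((k : Int) + 2) = (((k + 2 : Nat)) : Int) := by push_cast; ring
  rw [h, PySem.List.pyGetD_natCast]
  simp [List.getD]

theorem wcs_mod_natCast (k : Nat) : PySem.Int.mod (k : Int) 2 = (k % 2 : Nat) := by
  simp [PySem.Int.mod, Int.fmod_eq_emod]

-- shifting the loop index by 2 skips the two leading entries of both lists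
theorem wcsStep_shift (fs ss : List (String × Int)) (X Y U V : String × Int)
    (out : String × String) (k : Nat) :
    wcsStep (X :: Y :: fs) (U :: V :: ss) out ((k : Int) + 2) = wcsStep fs ss out (k : Int) := by
  have hmod : PySem.Int.mod ((k : Int) + 2) 2 = PySem.Int.mod (k : Int) 2 := by
    have h2 : ((k : Int) + 2) = (((k + 2 : Nat)) : Int) := by push_cast; ring
    rw [h2, wcs_mod_natCast, wcs_mod_natCast]
    have : (k + 2) % 2 = k % 2 := by omega
    rw [this]
  by_cases hk : PySem.Int.mod (k : Int) 2 = 0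
  · have h1 : ((k : Int) + 2 + 1) = (((k + 1 : Nat) : Int) + 2) := by push_cast; ring
    have h2 : ((k : Int) + 1) = (((k + 1 : Nat)) : Int) := by push_cast; ring
    simp only [wcsStep, hmod, hk, reduceIte]
    rw [h1, h2, wcs_getD_shift2, wcs_getD_shift2, PySem.List.pyGetD_natCast,
      PySem.List.pyGetD_natCast]
  · obtain ⟨m, rfl⟩ : ∃ m, k = m + 1 := by
      refine ⟨k - 1, ?_⟩
      rcases Nat.eq_zero_or_pos k with h | h
      · exfalso
        apply hk
        subst h
        rw [wcs_mod_natCast]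
        norm_num
      · omega
    have h1 : (((m + 1 : Nat) : Int) + 2 - 1) = ((m : Int) + 2) := by push_cast; ring
    have h2 : (((m + 1 : Nat) : Int) - 1) = ((m : Nat) : Int) := by push_cast; ring
    simp only [wcsStep, hmod]
    rw [if_neg hk, if_neg hk, h1, h2, wcs_getD_shift2, wcs_getD_shift2,
      PySem.List.pyGetD_natCast, PySem.List.pyGetD_natCast]

theorem wcs_range_shift (fs ss : List (String × Int)) (X Y U V : String × Int)
    (init : String × String) (n : Nat) :
    (PySem.List.pyRange 2 ((n : Int) + 2) 1).foldl (wcsStep (X :: Y :: fs) (U :: V :: ss)) init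
      = (PySem.List.pyRange 0 (n : Int) 1).foldl (wcsStep fs ss) init := by
  rw [PySem.List.pyRange_one, PySem.List.pyRange_one]
  have hn : (((n : Int) + 2) - 2).toNat = n := by omega
  have hn0 : (((n : Int)) - 0).toNat = n := by omega
  rw [hn, hn0, List.foldl_map, List.foldl_map]
  apply PySem.List.foldl_congr_mem
  intro acc k _
  have h : ((2 : Int) + (k : Int)) = ((k : Int) + 2) := by ring
  rw [h, wcsStep_shift]
  simp

-- iterations i and i+1 of A's loop produce exactly the pair's two cells, appended to the rows
theorem wcs_loop : ∀ (results : List (List String)) (r0 r1 : String),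
    results.length % 2 = 0 →
    (PySem.List.pyRange 0 ((results.length : Int)) 1).foldl
        (wcsStep (results.map wcsF) (results.map wcsS)) (r0, r1)
      = (r0 ++ (wcsCells results).1, r1 ++ (wcsCells results).2)
  | [], r0, r1, _ => by simp [wcsCells]
  | [x], r0, r1, h => by simp at h
  | a :: b :: rest, r0, r1, h => by
    have hlen' : rest.length % 2 = 0 := by simp at h; omega
    have hcast : (((a :: b :: rest).length : Nat) : Int) = ((rest.length : Int) + 2) := by
      simp; ring
    rw [hcast]
    have hnn : (0 : Int) ≤ (rest.length : Int) := by positivity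
    have h0 : (0 : Int) < (rest.length : Int) + 2 := by omega
    have h1 : (1 : Int) < (rest.length : Int) + 2 := by omega
    rw [PySem.List.pyRange_one_cons h0, show (0 : Int) + 1 = 1 by ring,
      PySem.List.pyRange_one_cons h1, show (1 : Int) + 1 = 2 by ring]
    simp only [List.foldl_cons, List.map_cons]
    rw [wcs_range_shift, wcs_loop rest _ _ hlen']
    show _ = (r0 ++ (wcsCells (a :: b :: rest)).1, r1 ++ (wcsCells (a :: b :: rest)).2)
    rw [show wcsCells (a :: b :: rest)
          = (wcsPad (PySem.List.pyGetD a 0 "")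
                (max (PySem.Str.len (PySem.List.pyGetD a 0 "")) (PySem.Str.len (PySem.List.pyGetD b 1 ""))) ++ "|"
                ++ wcsPad (PySem.List.pyGetD b 0 "")
                (max (PySem.Str.len (PySem.List.pyGetD b 0 "")) (PySem.Str.len (PySem.List.pyGetD a 1 ""))) ++ "|"
                ++ (wcsCells rest).1,
             wcsPad (PySem.List.pyGetD b 1 "")
                (max (PySem.Str.len (PySem.List.pyGetD a 0 "")) (PySem.Str.len (PySem.List.pyGetD b 1 ""))) ++ "|"
                ++ wcsPad (PySem.List.pyGetD a 1 "")
                (max (PySem.Str.len (PySem.List.pyGetD b 0 "")) (PySem.Str.len (PySem.List.pyGetD a 1 ""))) ++ "|"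
                ++ (wcsCells rest).2) from rfl]
    congr 1
    · simp [wcsStep, wcsF, wcsS, wcsPad, PySem.List.pyGetD_ofNat', String.append_assoc]
    · simp [wcsStep, wcsF, wcsS, wcsPad, PySem.List.pyGetD_ofNat', String.append_assoc]

-- B's staged rows are exactly the pairwise cell concatenations
theorem wcs_alt_rows : ∀ (results : List (List String)),
    results.length % 2 = 0 →
    wcsRow (results.map (fun g => PySem.List.pyGetD g 0 ""))
        (((results.map (fun g => PySem.List.pyGetD g 0 "")).zip
            (wcsSwapPairs (results.map (fun g => PySem.List.pyGetD g 1 "")) [])).map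
          (fun ts => max (PySem.Str.len ts.1) (PySem.Str.len ts.2)))
      = (wcsCells results).1
    ∧ wcsRow (wcsSwapPairs (results.map (fun g => PySem.List.pyGetD g 1 "")) [])
        (((results.map (fun g => PySem.List.pyGetD g 0 "")).zip
            (wcsSwapPairs (results.map (fun g => PySem.List.pyGetD g 1 "")) [])).map
          (fun ts => max (PySem.Str.len ts.1) (PySem.Str.len ts.2)))
      = (wcsCells results).2
  | [], _ => by
    constructor <;> simp [wcsCells, wcsRow, PySem.Str.join, PySem.Chars.join, List.intercalate]
  | [x], h => by simp at h
  | a :: b :: rest, h => by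
    have hlen' : rest.length % 2 = 0 := by simp at h; omega
    have hswap : wcsSwapPairs ((a :: b :: rest).map (fun g => PySem.List.pyGetD g 1 "")) []
        = PySem.List.pyGetD b 1 "" :: PySem.List.pyGetD a 1 ""
            :: wcsSwapPairs (rest.map (fun g => PySem.List.pyGetD g 1 "")) [] := by
      rw [List.map_cons, List.map_cons, wcsSwapPairs, wcsSwapPairs_acc]
      simp [PySem.List.pyGetD_ofNat']
    rw [hswap]
    simp only [List.map_cons, List.zip_cons_cons, wcsRow_cons]
    have hrec := wcs_alt_rows rest hlen'
    rw [show wcsCells (a :: b :: rest)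
          = (wcsPad (PySem.List.pyGetD a 0 "")
                (max (PySem.Str.len (PySem.List.pyGetD a 0 "")) (PySem.Str.len (PySem.List.pyGetD b 1 ""))) ++ "|"
                ++ wcsPad (PySem.List.pyGetD b 0 "")
                (max (PySem.Str.len (PySem.List.pyGetD b 0 "")) (PySem.Str.len (PySem.List.pyGetD a 1 ""))) ++ "|"
                ++ (wcsCells rest).1,
             wcsPad (PySem.List.pyGetD b 1 "")
                (max (PySem.Str.len (PySem.List.pyGetD a 0 "")) (PySem.Str.len (PySem.List.pyGetD b 1 ""))) ++ "|"
                ++ wcsPad (PySem.List.pyGetD a 1 "")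
                (max (PySem.Str.len (PySem.List.pyGetD b 0 "")) (PySem.Str.len (PySem.List.pyGetD a 1 ""))) ++ "|"
                ++ (wcsCells rest).2) from rfl]
    refine ⟨?_, ?_⟩
    · rw [hrec.1]; simp [String.append_assoc]
    · rw [hrec.2]; simp [String.append_assoc]

-- ===== VERDICT (by name: the statement is the Claim_ definition above) =====
theorem worldCupStages_spec : Claim_equal_worldCupStages := by
  intro results _hdom hpre
  unfold Spec_worldCupStages
  simp only [worldCupStages, worldCupStages_alt, wcs_fold_pair, List.nil_append,
    PySem.List.len_eq, List.length_map, List.map_cons, List.map_nil]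
  rw [wcs_loop results "|" "|" hpre.1]
  have h := wcs_alt_rows results hpre.1
  rw [h.1, h.2]
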